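-- pv_equiv track=rewrite | github.com/0xlegacy52/bountyx-tool | ai_helper.py | _find_interesting_directories
-- ===== SOURCE A (Python) =====
-- def _find_interesting_directories(directories):
--     """Find potentially interesting directories"""
--     interesting_keywords = [
--         '.git', '.env', 'wp-admin', 'admin', 'backup', 'db', 'config',
--         'dashboard', 'login', 'api', 'test', 'dev', 'staging', 'beta',
--         'phpinfo', 'phpmyadmin', 'jenkins', 'jira', 'confluence',
--         'password', 'credentials', 'sql', 'database'
--     ]
--
--     interesting = []
--     for directory in directories:
--         url = directory.get('url', '')
--         for keyword in interesting_keywords: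
--             if keyword in url.lower():
--                 interesting.append(directory)
--                 break
--
--     return interesting
-- ===== SOURCE B (Python) =====
-- _KEYWORDS = [
--     '.git', '.env', 'wp-admin', 'admin', 'backup', 'db', 'config',
--     'dashboard', 'login', 'api', 'test', 'dev', 'staging', 'beta',
--     'phpinfo', 'phpmyadmin', 'jenkins', 'jira', 'confluence',
--     'password', 'credentials', 'sql', 'database'
-- ]
--
-- # hash-set of keywords and the sorted distinct keyword lengths, built once
-- _KEYSET = set(_KEYWORDS)
-- _LENS = sorted({len(k) for k in _KEYWORDS})
--
--
-- def _has_keyword(s):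
--     """Scan positions; at each one look the candidate slices up in the keyword set."""
--     return any(s[i:i + n] in _KEYSET for i in range(len(s)) for n in _LENS)
--
--
-- def _find_interesting_directories(directories):
--     return [d for d in directories if _has_keyword(d.get('url', '').lower())]
-- ===== Notes on version B (the rewrite author's own statement) =====
-- stated objective: alternative
-- what changed: Instead of A's per-keyword substring search with break, B builds a hash set of the keywords and their distinct sorted lengths once, then scans each lowered URL position by position looking the candidate slices up in the set, and selects directories with a comprehension instead of an accumulator loop.
import Mathlib
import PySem

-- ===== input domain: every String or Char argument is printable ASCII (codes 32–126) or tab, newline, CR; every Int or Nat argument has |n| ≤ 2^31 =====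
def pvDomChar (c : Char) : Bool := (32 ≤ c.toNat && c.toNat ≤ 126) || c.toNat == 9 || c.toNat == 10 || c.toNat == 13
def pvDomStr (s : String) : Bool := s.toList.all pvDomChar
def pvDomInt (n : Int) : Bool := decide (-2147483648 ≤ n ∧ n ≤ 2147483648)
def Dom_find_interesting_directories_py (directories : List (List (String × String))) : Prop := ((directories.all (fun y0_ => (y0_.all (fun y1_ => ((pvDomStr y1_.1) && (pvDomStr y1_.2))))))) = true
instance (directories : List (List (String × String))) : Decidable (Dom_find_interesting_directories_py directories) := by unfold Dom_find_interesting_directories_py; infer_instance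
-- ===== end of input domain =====

-- B replaces A's per-keyword substring searches (with break) by a position-by-position scan of the
-- lowered URL that looks candidate slices up in a set of the keywords; equal results, similar cost.

-- the keyword list A carries verbatim (B's copy is pvKeywordsB below)
def pvKeywords : List String :=
  [".git", ".env", "wp-admin", "admin", "backup", "db", "config",
   "dashboard", "login", "api", "test", "dev", "staging", "beta",
   "phpinfo", "phpmyadmin", "jenkins", "jira", "confluence",
   "password", "credentials", "sql", "database"]

-- ===== PORT A =====
-- inner loop: 'for keyword in …: if keyword in url.lower(): append(directory); break'
def pvInnerA : List String → String → Bool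
  | [], _ => false
  | k :: ks, url => if PySem.Str.isIn k (PySem.Str.lower url) then true else pvInnerA ks url

def find_interesting_directories_py (directories : List (List (String × String))) : List (List (String × String)) :=
  directories.foldl (fun interesting directory =>
    let url := (PySem.Dict.mk directory).getD "url" ""
    if pvInnerA pvKeywords url then interesting ++ [directory] else interesting) []

-- ===== PORT B =====
def pvKeywordsB : List String :=
  [".git", ".env", "wp-admin", "admin", "backup", "db", "config",
   "dashboard", "login", "api", "test", "dev", "staging", "beta",
   "phpinfo", "phpmyadmin", "jenkins", "jira", "confluence",
   "password", "credentials", "sql", "database"]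

-- _KEYSET = set(_KEYWORDS)
def pvKeySet : PySem.Set String := PySem.Set.ofList pvKeywordsB

-- _LENS = sorted({len(k) for k in _KEYWORDS})
def pvLens : List Nat :=
  PySem.List.sorted (PySem.Set.ofList (pvKeywordsB.map (fun k => k.toList.length))) (fun x => x) false

-- _has_keyword: any(s[i:i+n] in _KEYSET …); s[i:i+n] with 0 ≤ i, 0 ≤ n is (toList.drop i).take n
def pvHasKeyword (s : String) : Bool :=
  (List.range s.toList.length).any (fun i =>
    pvLens.any (fun n => pvKeySet.contains (String.ofList ((s.toList.drop i).take n))))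

def find_interesting_directories_py_alt (directories : List (List (String × String))) : List (List (String × String)) :=
  directories.filter (fun d => pvHasKeyword (PySem.Str.lower ((PySem.Dict.mk d).getD "url" "")))

-- ===== PRECONDITION & SPEC =====
def Spec_find_interesting_directories_py (directories : List (List (String × String))) (out : List (List (String × String))) : Prop := out = find_interesting_directories_py_alt directories
instance (directories : List (List (String × String))) (out : List (List (String × String))) : Decidable (Spec_find_interesting_directories_py directories out) := by unfold Spec_find_interesting_directories_py; infer_instance

-- ===== CLAIM (what is proved, stated in full; the proofs are below) =====
def Claim_equal_find_interesting_directories_py : Prop := ∀ (directories : List (List (String × String))), Dom_find_interesting_directories_py directories → Spec_find_interesting_directories_py directories (find_interesting_directories_py directories)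

-- ===== LEMMAS AND PROOFS =====
lemma pvKeywords_ne_nil : ∀ k ∈ pvKeywords, k.toList ≠ [] := by decide

lemma pvLens_mem : ∀ k ∈ pvKeywords, k.toList.length ∈ pvLens := by decide

lemma pvInnerA_eq_any (ks : List String) (url : String) :
    pvInnerA ks url = ks.any (fun k => PySem.Str.isIn k (PySem.Str.lower url)) := by
  induction ks with
  | nil => rfl
  | cons k ks ih =>
      rw [pvInnerA, ih, List.any_cons]
      cases hb : PySem.Str.isIn k (PySem.Str.lower url) <;> simp

-- a nonempty pattern is an infix iff it is a prefix at some position strictly inside the list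
lemma pv_infix_iff_prefix_at (sub cs : List Char) (hne : sub ≠ []) :
    sub <:+: cs ↔ ∃ i < cs.length, sub <+: cs.drop i := by
  constructor
  · rintro ⟨pre, post, h⟩
    refine ⟨pre.length, ?_, ?_⟩
    · have : cs.length = pre.length + (sub.length + post.length) := by
        simp [← h, List.length_append]
      have hs : 0 < sub.length := List.length_pos_iff.mpr hne
      omega
    · have : cs.drop pre.length = sub ++ post := by
        rw [← h, List.append_assoc, List.drop_left]
      exact this ▸ ⟨post, rfl⟩
  · rintro ⟨i, _, hpre⟩
    exact hpre.isInfix.trans (List.drop_suffix i cs).isInfix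

lemma pv_pointwise (u : String) :
    pvInnerA pvKeywords u = pvHasKeyword (PySem.Str.lower u) := by
  rw [pvInnerA_eq_any, pvHasKeyword, Bool.eq_iff_iff]
  simp only [List.any_eq_true, List.mem_range, PySem.Str.isIn_iff_infix,
    PySem.Set.contains_iff, pvKeySet, PySem.Set.mem_ofList]
  constructor
  · rintro ⟨k, hk, hinf⟩
    obtain ⟨i, hi, hpre⟩ := (pv_infix_iff_prefix_at _ _ (pvKeywords_ne_nil k hk)).1 hinf
    refine ⟨i, hi, k.toList.length, pvLens_mem k hk, ?_⟩
    have hk' : (((PySem.Str.lower u).toList.drop i).take k.toList.length) = k.toList :=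
      (List.prefix_iff_eq_take.1 hpre).symm
    rw [hk', String.ofList_toList]
    exact hk
  · rintro ⟨i, hi, n, _, hmem⟩
    refine ⟨_, hmem, ?_⟩
    refine (pv_infix_iff_prefix_at _ _ (pvKeywords_ne_nil _ hmem)).2 ⟨i, hi, ?_⟩
    rw [String.toList_ofList]
    exact List.take_prefix n _

-- ===== VERDICT (by name: the statement is the Claim_ definition above) =====
theorem find_interesting_directories_py_spec : Claim_equal_find_interesting_directories_py := by
  intro directories _
  show find_interesting_directories_py directories = find_interesting_directories_py_alt directories
  unfold find_interesting_directories_py find_interesting_directories_py_alt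
  rw [PySem.List.foldl_append_if_eq_filter, List.nil_append]
  exact List.filter_congr (fun d _ => pv_pointwise _)
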